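-- pv_equiv track=rewrite | github.com/ykuchiki/Gomoku | gamestate.py | is_consecutive_five
-- ===== SOURCE A (Python) =====
-- def is_consecutive_five(line):
--     """ 一列内に5つ連続する駒があるかチェックするヘルパー関数 """
--     count = 0
--     for piece in line:
--         if piece == 1:
--             count += 1
--             if count == 5:
--                 return True
--         else:
--             count = 0
--     return False
-- ===== SOURCE B (Python) =====
-- def is_consecutive_five(line):
--     """Run-length decomposition: scan maximal runs of equal pieces; True iff a run of 1s has length >= 5."""
--     i = 0
--     n = len(line)
--     while i < n:
--         j = i
--         while j < n and line[j] == line[i]: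
--             j += 1
--         if line[i] == 1 and j - i >= 5:
--             return True
--         i = j
--     return False
-- ===== Notes on version B (the rewrite author's own statement) =====
-- stated objective: alternative
-- what changed: Replaced the running counter with reset by a run-length decomposition: an outer loop over maximal runs of equal elements that checks each run of 1s for length >= 5.
import Mathlib
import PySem

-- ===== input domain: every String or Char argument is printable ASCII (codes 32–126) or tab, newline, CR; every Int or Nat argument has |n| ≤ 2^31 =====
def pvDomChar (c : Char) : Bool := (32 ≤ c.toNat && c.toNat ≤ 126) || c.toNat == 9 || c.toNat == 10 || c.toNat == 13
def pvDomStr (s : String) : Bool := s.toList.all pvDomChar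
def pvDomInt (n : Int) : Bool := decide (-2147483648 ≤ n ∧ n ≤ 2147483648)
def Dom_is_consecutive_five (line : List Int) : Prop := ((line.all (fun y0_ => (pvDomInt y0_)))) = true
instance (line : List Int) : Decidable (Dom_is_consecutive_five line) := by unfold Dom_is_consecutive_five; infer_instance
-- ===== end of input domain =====

-- B replaces A's running counter with a run-length decomposition over maximal runs of equal elements (alternative, same cost).


-- ===== PORT A =====
-- A's loop: counter incremented on 1, reset on anything else, early return at 5
def goA : List Int → Int → Bool
  | [], _ => false
  | p :: rest, count =>
    if p = 1 then
      if count + 1 = 5 then true else goA rest (count + 1)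
    else goA rest 0

def is_consecutive_five (line : List Int) : Bool := goA line 0

-- ===== PORT B =====
-- B's outer while loop over maximal runs: the inner while loop (j advancing over equal
-- elements) is the takeWhile/dropWhile of the run at the current position.
def goB : List Int → Bool
  | [] => false
  | p :: rest =>
    let run := rest.takeWhile (· == p)
    if p = 1 ∧ run.length + 1 ≥ 5 then true
    else goB (rest.dropWhile (· == p))
termination_by l => l.length
decreasing_by
  simp only [List.length_cons]
  exact Nat.lt_succ_of_le (List.length_dropWhile_le _ rest)

def is_consecutive_five_alt (line : List Int) : Bool := goB line

-- ===== PRECONDITION & SPEC =====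
def Spec_is_consecutive_five (line : List Int) (out : Bool) : Prop := out = is_consecutive_five_alt line
instance (line : List Int) (out : Bool) : Decidable (Spec_is_consecutive_five line out) := by unfold Spec_is_consecutive_five; infer_instance

-- ===== CLAIM (what is proved, stated in full; the proofs are below) =====
def Claim_equal_is_consecutive_five : Prop := ∀ (line : List Int), Dom_is_consecutive_five line → Spec_is_consecutive_five line (is_consecutive_five line)

-- ===== LEMMAS AND PROOFS =====

-- A's counter over the leading run of 1s: reaches 5 iff c + run length ≥ 5, else resumes at 0 after the run
lemma goA_ones (line : List Int) (c : Int) (h0 : 0 ≤ c) (h5 : c < 5) :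
    goA line c = ((decide (5 ≤ c + ((line.takeWhile (· == (1:Int))).length : Int))) ||
      goA (line.dropWhile (· == (1:Int))) 0) := by
  induction line generalizing c with
  | nil => simp [goA]; omega
  | cons p rest ih =>
    by_cases hp : p = 1
    · subst hp
      simp only [goA, List.takeWhile_cons, List.dropWhile_cons]
      simp only [BEq.rfl, if_pos, List.length_cons]
      by_cases h45 : c + 1 = 5
      · have : decide (5 ≤ c + (((1:Int) :: rest.takeWhile (· == (1:Int))).length : Int)) = true := by
          simp only [List.length_cons]; push_cast; simp; omega
        simp_all
      · rw [if_neg h45, ih (c + 1) (by omega) (by omega)]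
        congr 1
        simp only [decide_eq_decide]
        push_cast; omega
    · have hb : ((p == (1:Int)) = false) := by simpa using hp
      simp only [goA, if_neg hp, List.takeWhile_cons, List.dropWhile_cons, hb,
        Bool.false_eq_true, if_false, List.length_nil]
      have hd : decide (5 ≤ c + ((0:Nat) : Int)) = false := decide_eq_false (by push_cast; omega)
      rw [hd, Bool.false_or]

-- A with counter 0 ignores a leading run of non-1 pieces
lemma goA_skip (p : Int) (hp : p ≠ 1) (rest : List Int) :
    goA rest 0 = goA (rest.dropWhile (· == p)) 0 := by
  induction rest with
  | nil => simp
  | cons q t ih =>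
    by_cases hq : q = p
    · subst hq
      have : goA (q :: t) 0 = goA t 0 := by simp [goA, hp]
      rw [List.dropWhile_cons, if_pos (by simp)]
      rw [this, ih]
    · rw [List.dropWhile_cons, if_neg (by simpa using hq)]

lemma goA_eq_goB : ∀ (n : Nat) (line : List Int), line.length ≤ n → goA line 0 = goB line := by
  intro n
  induction n with
  | zero =>
    intro line h
    have : line = [] := List.eq_nil_of_length_eq_zero (Nat.le_zero.mp h)
    subst this; simp [goA, goB]
  | succ n ih =>
    intro line h
    match line with
    | [] => simp [goA, goB]
    | p :: rest =>
      rw [goB]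
      by_cases hp : p = 1
      · subst hp
        rw [goA_ones _ 0 le_rfl (by omega)]
        have htk : ((1:Int) :: rest).takeWhile (· == (1:Int)) =
            (1:Int) :: rest.takeWhile (· == (1:Int)) := by
          rw [List.takeWhile_cons, if_pos (by simp)]
        have hdw : ((1:Int) :: rest).dropWhile (· == (1:Int)) =
            rest.dropWhile (· == (1:Int)) := by
          rw [List.dropWhile_cons, if_pos (by simp)]
        rw [htk, hdw]
        have hrec : goA (rest.dropWhile (· == (1:Int))) 0 = goB (rest.dropWhile (· == (1:Int))) := by
          apply ih
          have := List.length_dropWhile_le (· == (1:Int)) rest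
          simp only [List.length_cons] at h
          omega
        rw [hrec]
        by_cases hc : (1:Int) = 1 ∧ (rest.takeWhile (· == (1:Int))).length + 1 ≥ 5
        · rw [if_pos hc]
          rw [Bool.or_eq_true]
          left
          simp only [List.length_cons, decide_eq_true_eq]
          push_cast
          omega
        · rw [if_neg hc]
          have hlt : (rest.takeWhile (· == (1:Int))).length + 1 < 5 := by
            by_contra hge
            exact hc ⟨rfl, by omega⟩
          simp only [List.length_cons]
          simp
          intro hge
          exfalso
          omega
      · have : goA (p :: rest) 0 = goA rest 0 := by simp [goA, hp]
        rw [this, if_neg (by intro hco; exact hp hco.1), goA_skip p hp rest]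
        apply ih
        have := List.length_dropWhile_le (· == p) rest
        simp only [List.length_cons] at h
        omega

-- ===== VERDICT (by name: the statement is the Claim_ definition above) =====
theorem is_consecutive_five_spec : Claim_equal_is_consecutive_five := by
  intro line _
  unfold Spec_is_consecutive_five is_consecutive_five is_consecutive_five_alt
  exact goA_eq_goB line.length line le_rfl
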